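-- pv_equiv track=rewrite | github.com/web3guru888/ASTRA | stan_core/autonomous_research/engines/experiment_designer.py | _select_instruments
-- ===== SOURCE A (Python) =====
-- from typing import List, Dict, Any, Optional
--
-- def _select_instruments(required_data: List[str]) -> List[str]:
--     """Select appropriate instruments for required data"""
--     # Simple selection - in production would be more sophisticated
--     instruments = []
--
--     if any('width' in d.lower() or 'structure' in d.lower() for d in required_data):
--         instruments.append('ALMA')
--         instruments.append('Herschel')
--
--     if any('spectral' in d.lower() or 'kinematics' in d.lower() for d in required_data):
--         instruments.append('VLT')
--         instruments.append('JWST')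
--
--     if any('position' in d.lower() or 'proper_motion' in d.lower() for d in required_data):
--         instruments.append('Gaia')
--
--     return instruments if instruments else ['ALMA', 'JWST']
-- ===== SOURCE B (Python) =====
-- def _select_instruments(required_data):
--     """Select appropriate instruments for required data"""
--     has_struct = has_spec = has_pos = False
--     for d in required_data:
--         dl = d.lower()
--         if 'width' in dl or 'structure' in dl:
--             has_struct = True
--         if 'spectral' in dl or 'kinematics' in dl:
--             has_spec = True
--         if 'position' in dl or 'proper_motion' in dl:
--             has_pos = True
--     instruments = []
--     if has_struct:
--         instruments += ['ALMA', 'Herschel']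
--     if has_spec:
--         instruments += ['VLT', 'JWST']
--     if has_pos:
--         instruments.append('Gaia')
--     return instruments or ['ALMA', 'JWST']
-- ===== Notes on version B (the rewrite author's own statement) =====
-- stated objective: faster
-- what changed: Replaces three separate any() scans (each lowercasing every string again) with a single pass that lowercases each entry once and sets three flags, then assembles the instrument list from the flags.
import Mathlib
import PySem

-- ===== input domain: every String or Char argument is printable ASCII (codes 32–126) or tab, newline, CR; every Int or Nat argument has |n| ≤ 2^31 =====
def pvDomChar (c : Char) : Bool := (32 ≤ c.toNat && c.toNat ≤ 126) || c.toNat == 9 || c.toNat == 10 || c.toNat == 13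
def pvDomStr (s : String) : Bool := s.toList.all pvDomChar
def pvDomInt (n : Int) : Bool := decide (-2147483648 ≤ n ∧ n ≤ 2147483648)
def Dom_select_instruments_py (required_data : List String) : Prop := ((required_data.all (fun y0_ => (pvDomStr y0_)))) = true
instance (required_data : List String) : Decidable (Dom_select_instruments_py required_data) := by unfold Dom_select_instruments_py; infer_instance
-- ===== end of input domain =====

-- B lowercases each entry once in a single pass setting three flags, instead of A's three any() scans; same return value.

-- ===== PORT A =====
def select_instruments_py (required_data : List String) : List String :=
  let instruments : List String := []
  let instruments :=
    if required_data.any (fun d =>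
        PySem.Str.isIn "width" (PySem.Str.lower d) || PySem.Str.isIn "structure" (PySem.Str.lower d)) then
      (instruments ++ ["ALMA"]) ++ ["Herschel"]
    else instruments
  let instruments :=
    if required_data.any (fun d =>
        PySem.Str.isIn "spectral" (PySem.Str.lower d) || PySem.Str.isIn "kinematics" (PySem.Str.lower d)) then
      (instruments ++ ["VLT"]) ++ ["JWST"]
    else instruments
  let instruments :=
    if required_data.any (fun d =>
        PySem.Str.isIn "position" (PySem.Str.lower d) || PySem.Str.isIn "proper_motion" (PySem.Str.lower d)) then
      instruments ++ ["Gaia"]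
    else instruments
  if instruments ≠ [] then instruments else ["ALMA", "JWST"]

-- ===== PORT B =====
-- single fold over required_data maintaining three boolean flags (each entry lowered once)
def select_instruments_py_alt_flags (required_data : List String) : Bool × Bool × Bool :=
  required_data.foldl (fun acc d =>
    let dl := PySem.Str.lower d
    let hs := if PySem.Str.isIn "width" dl || PySem.Str.isIn "structure" dl then true else acc.1
    let hp := if PySem.Str.isIn "spectral" dl || PySem.Str.isIn "kinematics" dl then true else acc.2.1
    let hg := if PySem.Str.isIn "position" dl || PySem.Str.isIn "proper_motion" dl then true else acc.2.2
    (hs, hp, hg)) (false, false, false)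

def select_instruments_py_alt (required_data : List String) : List String :=
  let f := select_instruments_py_alt_flags required_data
  let instruments : List String := []
  let instruments := if f.1 then instruments ++ ["ALMA", "Herschel"] else instruments
  let instruments := if f.2.1 then instruments ++ ["VLT", "JWST"] else instruments
  let instruments := if f.2.2 then instruments ++ ["Gaia"] else instruments
  if instruments ≠ [] then instruments else ["ALMA", "JWST"]

-- ===== PRECONDITION & SPEC =====
def Spec_select_instruments_py (required_data : List String) (out : List String) : Prop := out = select_instruments_py_alt required_data
instance (required_data : List String) (out : List String) : Decidable (Spec_select_instruments_py required_data out) := by unfold Spec_select_instruments_py; infer_instance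

-- ===== CLAIM (what is proved, stated in full; the proofs are below) =====
def Claim_equal_select_instruments_py : Prop := ∀ (required_data : List String), Dom_select_instruments_py required_data → Spec_select_instruments_py required_data (select_instruments_py required_data)

-- ===== LEMMAS AND PROOFS =====

theorem flags_eq_any (xs : List String) (a b c : Bool) :
    xs.foldl (fun acc d =>
      let dl := PySem.Str.lower d
      let hs := if PySem.Str.isIn "width" dl || PySem.Str.isIn "structure" dl then true else acc.1
      let hp := if PySem.Str.isIn "spectral" dl || PySem.Str.isIn "kinematics" dl then true else acc.2.1
      let hg := if PySem.Str.isIn "position" dl || PySem.Str.isIn "proper_motion" dl then true else acc.2.2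
      (hs, hp, hg)) (a, b, c)
    = (a || xs.any (fun d => PySem.Str.isIn "width" (PySem.Str.lower d) || PySem.Str.isIn "structure" (PySem.Str.lower d)),
       b || xs.any (fun d => PySem.Str.isIn "spectral" (PySem.Str.lower d) || PySem.Str.isIn "kinematics" (PySem.Str.lower d)),
       c || xs.any (fun d => PySem.Str.isIn "position" (PySem.Str.lower d) || PySem.Str.isIn "proper_motion" (PySem.Str.lower d))) := by
  induction xs generalizing a b c with
  | nil => simp
  | cons x xs ih =>
    simp only [List.foldl_cons, List.any_cons, ih]
    split_ifs <;> simp_all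

theorem select_instruments_py_eq (required_data : List String) :
    select_instruments_py required_data = select_instruments_py_alt required_data := by
  unfold select_instruments_py select_instruments_py_alt select_instruments_py_alt_flags
  rw [flags_eq_any]
  simp only [Bool.false_or]
  split_ifs <;> simp_all

-- ===== VERDICT (by name: the statement is the Claim_ definition above) =====
theorem select_instruments_py_spec : Claim_equal_select_instruments_py := by
  intro rd _
  exact select_instruments_py_eq rd
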